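-- pv_equiv track=rewrite | github.com/baltazarortiz/hope-policies | policy_tests/conftest.py | composites
-- ===== SOURCE A (Python) =====
-- import itertools
-- import operator
-- from functools import reduce
--
-- def permutePols(polStrs):
--     p = sorted(polStrs)
--     # list of number of policies
--     ns = list(range(1,len(p)+1))
--     # list of combinations for each n
--     combs = [list(map(sorted,itertools.combinations(p, n))) for n in ns]
--     # flatten list
--     return (reduce(operator.concat, combs, []))
--
-- def composites(policies, simple):
--
--     # generate all permutations
--     r = []
--     permuted_policies = permutePols(policies)
--
--     for p in permuted_policies:
--         if p:
--             r.append((p, "-".join(p)))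
--
--     # length of policy that has every member policy except none
--     full_composite_len = len(policies)
--     if "none" in policies:
--         full_composite_len -= 1
--     if "testSimple" in policies:
--         full_composite_len -= 1
--     if "testComplex" in policies:
--         full_composite_len -= 1
--
--     if simple: # single policies or full combination
--         return [x[1] for x in r if len(x[0]) == 1 or
--                 (    (len(x[0]) == full_composite_len)
--                  and (not "none" in x[0])
--                  and (not "testSimple" in x[0])
--                  and (not "testComplex" in x[0]))]
--     else: # single policies or any combination without none
--         return [x[1] for x in r if len(x[0]) == 1 or
--                 (     (not "none" in x[0])
--                   and (not "testSimple" in x[0])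
--                   and (not "testComplex" in x[0]))]
-- ===== SOURCE B (Python) =====
-- import itertools
--
-- _SPECIALS = ("none", "testSimple", "testComplex")
--
-- def composites(policies, simple):
--     s = sorted(policies)
--     t = [p for p in s if p not in _SPECIALS]
--     fcl = len(policies)
--     for sp in _SPECIALS:
--         if sp in policies:
--             fcl -= 1
--     if simple:
--         # the only surviving multi-policy combination is t itself (when sizes line up)
--         return s + (["-".join(t)] if fcl >= 2 and fcl == len(t) else [])
--     out = list(s)
--     for k in range(2, len(t) + 1):
--         out.extend("-".join(c) for c in itertools.combinations(t, k))
--     return out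
-- ===== Notes on version B (the rewrite author's own statement) =====
-- stated objective: alternative
-- what changed: A enumerates every subset of the sorted policy list and then filters; B never enumerates-and-filters: it returns the sorted singletons directly plus, in the simple branch, at most one full composite decided by a length count, and in the non-simple branch only the combinations of the specials-free sublist (the simple branch thus avoids subset enumeration entirely, but the non-simple output is itself exponential, so overall speed is not claimed).
import Mathlib
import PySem

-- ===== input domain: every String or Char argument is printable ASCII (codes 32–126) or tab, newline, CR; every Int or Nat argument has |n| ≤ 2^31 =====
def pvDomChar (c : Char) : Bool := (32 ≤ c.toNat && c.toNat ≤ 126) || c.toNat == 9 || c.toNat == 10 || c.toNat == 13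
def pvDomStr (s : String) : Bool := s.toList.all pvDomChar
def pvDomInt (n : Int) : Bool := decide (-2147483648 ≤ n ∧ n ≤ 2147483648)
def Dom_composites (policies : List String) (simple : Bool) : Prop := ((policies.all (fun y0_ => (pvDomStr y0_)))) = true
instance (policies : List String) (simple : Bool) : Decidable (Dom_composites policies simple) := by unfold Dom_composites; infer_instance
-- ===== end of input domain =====

-- B replaces A's enumerate-all-subsets-then-filter by emitting only the surviving entries directly:
-- the sorted singletons plus (simple branch) at most one full composite, or (non-simple branch) the
-- combinations of the specials-free list only.

-- ===== PORT A =====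
-- permutePols: sort, all combinations of each size 1..len (each re-sorted), flattened
def permutePols (polStrs : List String) : List (List String) :=
  let p := PySem.List.sorted polStrs (fun x => x) false
  let ns := List.range' 1 p.length
  let combs := ns.map (fun n =>
    (PySem.List.combinations p n).map (fun c => PySem.List.sorted c (fun x => x) false))
  combs.foldl (fun acc x => acc ++ x) []
def composites (policies : List String) (simple : Bool) : List String :=
  let permuted := permutePols policies
  let r := permuted.foldl
    (fun acc p => if p ≠ [] then acc ++ [(p, PySem.Str.join "-" p)] else acc)
    ([] : List (List String × String))
  let fcl0 : Int := (policies.length : Int)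
  let fcl1 : Int := if policies.contains "none" then fcl0 - 1 else fcl0
  let fcl2 : Int := if policies.contains "testSimple" then fcl1 - 1 else fcl1
  let fcl : Int := if policies.contains "testComplex" then fcl2 - 1 else fcl2
  if simple then
    (r.filter (fun x => x.1.length == 1 ||
      ((x.1.length : Int) == fcl && !(x.1.contains "none") &&
        !(x.1.contains "testSimple") && !(x.1.contains "testComplex")))).map (fun x => x.2)
  else
    (r.filter (fun x => x.1.length == 1 ||
      (!(x.1.contains "none") && !(x.1.contains "testSimple") &&
        !(x.1.contains "testComplex")))).map (fun x => x.2)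
-- ===== PORT B =====
def pvIsSpecial (p : String) : Bool := p == "none" || p == "testSimple" || p == "testComplex"

def composites_alt (policies : List String) (simple : Bool) : List String :=
  let s := PySem.List.sorted policies (fun x => x) false
  let t := s.filter (fun p => !(pvIsSpecial p))
  let fcl : Int := (["none", "testSimple", "testComplex"].foldl
    (fun acc sp => if policies.contains sp then acc - 1 else acc) (policies.length : Int))
  if simple then
    s ++ (if 2 ≤ fcl ∧ fcl = (t.length : Int) then [PySem.Str.join "-" t] else [])
  else
    (List.range' 2 (t.length - 1)).foldl
      (fun out k => out ++ (PySem.List.combinations t k).map (fun c => PySem.Str.join "-" c)) s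

-- ===== PRECONDITION & SPEC =====
def Spec_composites (policies : List String) (simple : Bool) (out : List String) : Prop := out = composites_alt policies simple
instance (policies : List String) (simple : Bool) (out : List String) : Decidable (Spec_composites policies simple out) := by unfold Spec_composites; infer_instance

-- ===== CLAIM (what is proved, stated in full; the proofs are below) =====
def Claim_equal_composites : Prop := ∀ (policies : List String) (simple : Bool), Dom_composites policies simple → Spec_composites policies simple (composites policies simple)

-- ===== LEMMAS AND PROOFS =====

-- the multi-policy "no special names" filter both branches of A apply, on the combination itself
def pvGood (c : List String) : Bool :=
  !(c.contains "none") && !(c.contains "testSimple") && !(c.contains "testComplex")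

lemma pv_join_one (x : String) : PySem.Str.join "-" [x] = x := by
  apply String.toList_inj.mp
  rw [PySem.Str.toList_join, List.map_cons, List.map_nil]
  exact PySem.Chars.join_singleton _ _

lemma pvGood_cons_special (x : String) (hx : pvIsSpecial x = true) (c : List String) :
    pvGood (x :: c) = false := by
  simp only [pvIsSpecial, Bool.or_eq_true, beq_iff_eq] at hx
  rcases hx with (h | h) | h <;> subst h <;> simp [pvGood]

lemma pvGood_cons_plain (x : String) (hx : pvIsSpecial x = false) (c : List String) :
    pvGood (x :: c) = pvGood c := by
  simp only [pvIsSpecial, Bool.or_eq_false_iff, beq_eq_false_iff_ne, ne_eq] at hx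
  simp [pvGood, Ne.symm hx.1.1, Ne.symm hx.1.2, Ne.symm hx.2]

-- combinations avoiding the special names = combinations of the specials-free sublist
lemma pv_comb_filter : ∀ (l : List String) (k : Nat),
    (PySem.List.combinations l k).filter pvGood
      = PySem.List.combinations (l.filter (fun p => !(pvIsSpecial p))) k := by
  intro l
  induction l with
  | nil => intro k; cases k <;> simp [PySem.List.combinations_zero, PySem.List.combinations_nil_succ, pvGood]
  | cons x xs ih =>
    intro k
    cases k with
    | zero => simp [PySem.List.combinations_zero, pvGood]
    | succ k =>
      rw [PySem.List.combinations_cons_succ, List.filter_append, List.filter_map]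
      by_cases hx : pvIsSpecial x = true
      · have h1 : (pvGood ∘ (fun c => x :: c)) = fun _ => false := by
          funext c; simp [Function.comp, pvGood_cons_special x hx]
        rw [h1]
        simp only [List.filter_false, List.map_nil, List.nil_append, ih]
        have h2 : List.filter (fun p => !(pvIsSpecial p)) (x :: xs)
            = List.filter (fun p => !(pvIsSpecial p)) xs := by simp [hx]
        rw [h2]
      · have hx' : pvIsSpecial x = false := by simpa using hx
        have h1 : (pvGood ∘ (fun c => x :: c)) = pvGood := by
          funext c; simp [Function.comp, pvGood_cons_plain x hx']
        rw [h1, ih, ih]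
        have h2 : List.filter (fun p => !(pvIsSpecial p)) (x :: xs)
            = x :: List.filter (fun p => !(pvIsSpecial p)) xs := by simp [hx']
        rw [h2, PySem.List.combinations_cons_succ]

lemma pv_countP_special (l : List String) :
    l.countP pvIsSpecial = l.count "none" + l.count "testSimple" + l.count "testComplex" := by
  induction l with
  | nil => simp
  | cons x xs ih =>
    simp only [List.countP_cons, List.count_cons, ih, pvIsSpecial]
    by_cases h1 : x = "none" <;> by_cases h2 : x = "testSimple" <;> by_cases h3 : x = "testComplex" <;>
      simp_all <;> omega

lemma pv_flatten_single (F : Nat → List String) (n₀ : Nat) (h : ∀ n, n ≠ n₀ → F n = []) :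
    ∀ (m a : Nat), ((List.range' a m).map F).flatten
      = if a ≤ n₀ ∧ n₀ < a + m then F n₀ else [] := by
  intro m
  induction m with
  | zero =>
    intro a
    simp
  | succ m ih =>
    intro a
    rw [List.range'_succ, List.map_cons, List.flatten_cons, ih]
    by_cases ha : a = n₀
    · subst ha
      have h2 : a ≤ a ∧ a < a + (m+1) := by omega
      simp [h2]
    · rw [h a ha, List.nil_append]
      split_ifs with h1 h2 <;> first | rfl | omega

lemma pv_map_sorted_id (s : List String) (hs : s.Pairwise (· ≤ ·)) (n : Nat) :
    (PySem.List.combinations s n).map (fun c => PySem.List.sorted c (fun x => x) false)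
      = PySem.List.combinations s n := by
  have h : ∀ c ∈ PySem.List.combinations s n,
      PySem.List.sorted c (fun x => x) false = c := by
    intro c hc
    exact PySem.List.sorted_eq_self_of_pairwise c (fun x => x)
      (List.Pairwise.sublist (PySem.List.sublist_of_mem_combinations hc) hs)
  calc (PySem.List.combinations s n).map (fun c => PySem.List.sorted c (fun x => x) false)
      = (PySem.List.combinations s n).map id := List.map_congr_left h
    _ = _ := List.map_id _
lemma pv_countP_not (l : List String) (p : String → Bool) :
    l.countP p + l.countP (fun a => !p a) = l.length := by
  induction l with
  | nil => simp
  | cons x xs ih => by_cases h : p x <;> simp [h] <;> omega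

lemma pv_main (policies : List String) (simple : Bool) :
    composites policies simple = composites_alt policies simple := by
  unfold composites composites_alt permutePols
  simp only [List.foldl]
  set s := PySem.List.sorted policies (fun x => x) false with hs
  have hsPair : s.Pairwise (· ≤ ·) := PySem.List.sorted_pairwise policies (fun x => x)
  have hsPerm : s.Perm policies := PySem.List.sorted_perm policies (fun x => x) false
  have hslen : s.length = policies.length := hsPerm.length_eq
  set t := s.filter (fun p => !(pvIsSpecial p)) with ht
  set fcl : Int := (if policies.contains "testComplex" = true then
      (if policies.contains "testSimple" = true then
          (if policies.contains "none" = true then (policies.length : Int) - 1 else (policies.length : Int)) - 1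
        else if policies.contains "none" = true then (policies.length : Int) - 1 else (policies.length : Int)) - 1
      else
        if policies.contains "testSimple" = true then
          (if policies.contains "none" = true then (policies.length : Int) - 1 else (policies.length : Int)) - 1
        else if policies.contains "none" = true then (policies.length : Int) - 1 else (policies.length : Int))
    with hfcl
  have hle : (t.length : Int) ≤ fcl := by
    have h1 : t.length = s.countP (fun p => !(pvIsSpecial p)) := by
      rw [ht, List.countP_eq_length_filter]
    have h2 : s.countP pvIsSpecial + s.countP (fun p => !(pvIsSpecial p)) = s.length :=
      pv_countP_not s pvIsSpecial
    have h3 := pv_countP_special s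
    have hc1 : s.count "none" = policies.count "none" := hsPerm.count_eq _
    have hc2 : s.count "testSimple" = policies.count "testSimple" := hsPerm.count_eq _
    have hc3 : s.count "testComplex" = policies.count "testComplex" := hsPerm.count_eq _
    have hm1 : policies.contains "none" = true → 1 ≤ policies.count "none" :=
      fun h => List.count_pos_iff.mpr (List.contains_iff_mem.mp h)
    have hm2 : policies.contains "testSimple" = true → 1 ≤ policies.count "testSimple" :=
      fun h => List.count_pos_iff.mpr (List.contains_iff_mem.mp h)
    have hm3 : policies.contains "testComplex" = true → 1 ≤ policies.count "testComplex" :=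
      fun h => List.count_pos_iff.mpr (List.contains_iff_mem.mp h)
    have hval : fcl = (policies.length : Int)
        - (if policies.contains "none" = true then 1 else 0)
        - (if policies.contains "testSimple" = true then 1 else 0)
        - (if policies.contains "testComplex" = true then 1 else 0) := by
      rw [hfcl]; split_ifs <;> ring
    have e1 : (if policies.contains "none" = true then (1:Int) else 0) ≤ policies.count "none" := by
      split_ifs with b
      · exact_mod_cast hm1 b
      · exact_mod_cast Nat.zero_le _
    have e2 : (if policies.contains "testSimple" = true then (1:Int) else 0) ≤ policies.count "testSimple" := by
      split_ifs with b
      · exact_mod_cast hm2 b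
      · exact_mod_cast Nat.zero_le _
    have e3 : (if policies.contains "testComplex" = true then (1:Int) else 0) ≤ policies.count "testComplex" := by
      split_ifs with b
      · exact_mod_cast hm3 b
      · exact_mod_cast Nat.zero_le _
    omega
  have htlen : t.length ≤ s.length := List.length_filter_le _ _
  rw [PySem.List.foldl_append_eq_flatten]
  rw [List.nil_append]
  rw [List.map_congr_left (fun n (_ : n ∈ List.range' 1 s.length) => pv_map_sorted_id s hsPair n)]
  rw [PySem.List.foldl_append_ite (p := fun p => p ≠ ([] : List String))
      (f := fun p => (p, PySem.Str.join "-" p))]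
  rw [List.nil_append]
  have hne : (((List.range' 1 s.length).map (fun n => PySem.List.combinations s n)).flatten.filter
        (fun p => decide (p ≠ []))) =
      ((List.range' 1 s.length).map (fun n => PySem.List.combinations s n)).flatten := by
    apply List.filter_eq_self.mpr
    intro c hc
    rcases List.mem_flatten.mp hc with ⟨L, hL, hcL⟩
    rcases List.mem_map.mp hL with ⟨n, hn, rfl⟩
    have h1 := (List.mem_range'_1.mp hn).1
    have h2 := PySem.List.length_of_mem_combinations hcL
    simp only [ne_eq, decide_eq_true_eq]
    intro hnil
    rw [hnil] at h2
    simp at h2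
    omega
  rw [hne]
  rw [List.filter_map, List.map_map]
  simp only [Function.comp_def]
  rw [List.filter_map, List.map_map]
  simp only [Function.comp_def]
  simp only [List.filter_flatten, List.map_flatten, List.map_map, Function.comp_def]
  have hhead : ∀ q : List String → Bool, (∀ x : String, q [x] = true) →
      List.map (fun x => PySem.Str.join "-" x) (List.filter q (PySem.List.combinations s 1)) = s := by
    intro q hq
    rw [PySem.List.combinations_one, List.filter_map, List.map_map]
    have h1 : (q ∘ fun x => [x]) = fun _ => true := funext fun x => hq x
    rw [h1, List.filter_true]
    have h2 : ∀ x ∈ s, ((fun x => PySem.Str.join "-" x) ∘ fun x => [x]) x = id x :=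
      fun x _ => pv_join_one x
    rw [List.map_congr_left h2, List.map_id]
  cases hN : policies.length with
  | zero =>
    have hpnil : policies = [] := List.length_eq_zero_iff.mp hN
    have hs0 : s = [] := List.perm_nil.mp (hpnil ▸ hsPerm)
    have ht0 : t = [] := by rw [ht, hs0]; rfl
    have hf0 : fcl = 0 := by rw [hfcl, hpnil]; simp
    rw [hs0, ht0, hf0]
    cases simple <;> simp
  | succ m =>
    have hsl : s.length = m + 1 := hslen.trans hN
    rw [hsl, List.range'_succ]
    simp only [List.map_cons, List.flatten_cons]
    have htm : t.length ≤ m + 1 := by omega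
    cases simple with
    | true =>
      simp only [if_true]
      simp only [show (1:Nat)+1 = 2 from rfl]
      rw [hhead _ (by intro x; simp)]
      have htail : List.map (fun n => List.map (fun x => PySem.Str.join "-" x)
            (List.filter (fun x => x.length == 1 ||
              ((x.length : Int) == fcl && !x.contains "none" && !x.contains "testSimple" && !x.contains "testComplex"))
              (PySem.List.combinations s n))) (List.range' 2 m)
          = List.map (fun (n : Nat) => if (n : Int) = fcl then
              List.map (fun x => PySem.Str.join "-" x) (PySem.List.combinations t n) else [])
              (List.range' 2 m) := by
        apply List.map_congr_left
        intro n hn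
        have hn2 : 2 ≤ n := (List.mem_range'_1.mp hn).1
        have hne1 : n ≠ 1 := by omega
        by_cases hf : (n : Int) = fcl
        · rw [if_pos hf]
          have hfe : List.filter (fun x => x.length == 1 ||
                ((x.length : Int) == fcl && !x.contains "none" && !x.contains "testSimple" && !x.contains "testComplex"))
                (PySem.List.combinations s n)
              = List.filter pvGood (PySem.List.combinations s n) := by
            apply List.filter_congr
            intro c hc
            have hlen := PySem.List.length_of_mem_combinations hc
            simp [pvGood, hlen, hf, hne1]
          rw [hfe, pv_comb_filter, ← ht]
        · rw [if_neg hf]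
          have hfe : List.filter (fun x => x.length == 1 ||
                ((x.length : Int) == fcl && !x.contains "none" && !x.contains "testSimple" && !x.contains "testComplex"))
                (PySem.List.combinations s n) = [] := by
            apply List.filter_eq_nil_iff.mpr
            intro c hc
            have hlen := PySem.List.length_of_mem_combinations hc
            simp [hlen, hf, hne1]
          rw [hfe]
          rfl
      rw [htail]
      rw [pv_flatten_single (fun (n : Nat) => if (n : Int) = fcl then
          List.map (fun x => PySem.Str.join "-" x) (PySem.List.combinations t n) else []) t.length (by
        intro n hne'
        beta_reduce
        by_cases hf : (n : Int) = fcl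
        · rw [if_pos hf]
          have h1 : (t.length : Int) ≤ (n : Int) := hf ▸ hle
          have h2 : t.length < n := by omega
          rw [PySem.List.combinations_eq_nil_of_length_lt t h2]
          rfl
        · rw [if_neg hf]) m 2]
      congr 1
      by_cases hf : fcl = (t.length : Int)
      · rw [if_pos hf.symm, PySem.List.combinations_length_self]
        simp only [List.map_cons, List.map_nil]
        split_ifs <;> first | rfl | (exfalso; omega)
      · rw [if_neg (fun h : (t.length : Int) = fcl => hf h.symm)]
        rw [if_neg (fun hh : 2 ≤ fcl ∧ fcl = (t.length : Int) => hf hh.2), ite_self]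
    | false =>
      simp only [Bool.false_eq_true, if_false]
      simp only [show (1:Nat)+1 = 2 from rfl]
      rw [hhead _ (by intro x; simp)]
      have htail : List.map (fun n => List.map (fun x => PySem.Str.join "-" x)
            (List.filter (fun x => x.length == 1 ||
              (!x.contains "none" && !x.contains "testSimple" && !x.contains "testComplex"))
              (PySem.List.combinations s n))) (List.range' 2 m)
          = List.map (fun n => List.map (fun x => PySem.Str.join "-" x) (PySem.List.combinations t n))
              (List.range' 2 m) := by
        apply List.map_congr_left
        intro n hn
        have hn2 : 2 ≤ n := (List.mem_range'_1.mp hn).1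
        have hne1 : n ≠ 1 := by omega
        have hfe : List.filter (fun x => x.length == 1 ||
              (!x.contains "none" && !x.contains "testSimple" && !x.contains "testComplex"))
              (PySem.List.combinations s n)
            = List.filter pvGood (PySem.List.combinations s n) := by
          apply List.filter_congr
          intro c hc
          have hlen := PySem.List.length_of_mem_combinations hc
          simp [pvGood, hlen, hne1]
        rw [hfe, pv_comb_filter, ← ht]
      rw [htail]
      rw [PySem.List.foldl_append_eq_flatMap, List.flatMap_def]
      congr 1
      have hsplitm : (t.length - 1) + (m - (t.length - 1)) = m := by omega
      have hr : List.range' 2 (t.length - 1) ++ List.range' (2 + (t.length - 1)) (m - (t.length - 1))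
          = List.range' 2 m := by
        have h := List.range'_append (s := 2) (m := t.length - 1) (n := m - (t.length - 1)) (step := 1)
        rw [one_mul, hsplitm] at h
        exact h
      rw [← hr, List.map_append, List.flatten_append]
      have h0 : ((List.range' (2 + (t.length - 1)) (m - (t.length - 1))).map
            (fun n => List.map (fun x => PySem.Str.join "-" x) (PySem.List.combinations t n))).flatten = [] := by
        apply List.flatten_eq_nil_iff.mpr
        intro L hL
        rcases List.mem_map.mp hL with ⟨n, hn, rfl⟩
        have hb := (List.mem_range'_1.mp hn).1
        have hlt : t.length < n := by omega
        rw [PySem.List.combinations_eq_nil_of_length_lt t hlt]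
        rfl
      rw [h0, List.append_nil]

-- ===== VERDICT (by name: the statement is the Claim_ definition above) =====
theorem composites_spec : Claim_equal_composites := by
  unfold Claim_equal_composites Spec_composites
  intro policies simple _
  exact pv_main policies simple
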